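-- pv_equiv track=rewrite | github.com/SKIRT/PTS | modeling/preparation/preparer.py | steps_between
-- ===== SOURCE A (Python) =====
-- steps = ["extraction", "extinction", "subtraction", "errormaps", "units"]
--
-- def steps_between(after_step, before_step):
--
--     """
--     This function ...
--     :param after_step:
--     :param before_step:
--     :return:
--     """
--
--     if after_step not in steps: raise ValueError("Invalid step: '" + after_step + "'")
--
--     the_steps = []
--     triggered = False
--     for stepi in steps:
--
--         if triggered:
--
--             if stepi == before_step: break
--             else: the_steps.append(stepi)
--
--         elif stepi == after_step: triggered = True
--
--         # Not triggered and not 'after_step'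
--         else: pass
--
--     return the_steps
-- ===== SOURCE B (Python) =====
-- steps = ["extraction", "extinction", "subtraction", "errormaps", "units"]
--
-- def steps_between(after_step, before_step):
--     if after_step not in steps: raise ValueError("Invalid step: '" + after_step + "'")
--     rest = steps[steps.index(after_step) + 1:]
--     if before_step in rest: rest = rest[:rest.index(before_step)]
--     return rest
-- ===== Notes on version B (the rewrite author's own statement) =====
-- stated objective: simpler
-- what changed: Replaces the triggered-flag single pass with break by position lookup (index) plus two slices
-- outside the precondition, e.g. on steps_between('bogus', 'units'): A raises ValueError, B raises ValueError
import Mathlib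
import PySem

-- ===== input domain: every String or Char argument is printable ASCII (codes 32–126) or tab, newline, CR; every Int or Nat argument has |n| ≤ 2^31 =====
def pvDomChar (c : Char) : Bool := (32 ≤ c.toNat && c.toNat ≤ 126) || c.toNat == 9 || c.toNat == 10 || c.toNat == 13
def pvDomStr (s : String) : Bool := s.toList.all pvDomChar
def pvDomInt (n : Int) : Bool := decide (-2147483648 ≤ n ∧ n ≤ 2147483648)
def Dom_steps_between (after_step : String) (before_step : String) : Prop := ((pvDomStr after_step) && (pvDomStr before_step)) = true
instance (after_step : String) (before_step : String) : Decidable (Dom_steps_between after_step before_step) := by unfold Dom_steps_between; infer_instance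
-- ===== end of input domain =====

-- B replaces A's triggered-flag scan with index lookup plus slicing (objective: simpler).

def stepsList : List String := ["extraction", "extinction", "subtraction", "errormaps", "units"]

-- ===== PORT A =====
-- the for-loop with the 'triggered' flag and the 'break'
def stepsLoopA (after_step before_step : String) : List String → List String → Bool → List String
  | [], the_steps, _ => the_steps
  | stepi :: rest, the_steps, triggered =>
    if triggered then
      if stepi == before_step then the_steps
      else stepsLoopA after_step before_step rest (the_steps ++ [stepi]) triggered
    else if stepi == after_step then stepsLoopA after_step before_step rest the_steps true
    else stepsLoopA after_step before_step rest the_steps triggered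

def steps_between (after_step : String) (before_step : String) : List String :=
  -- the 'after_step not in steps' guard raises ValueError; excluded by Pre_
  stepsLoopA after_step before_step stepsList [] false

-- ===== PORT B =====
def steps_between_alt (after_step : String) (before_step : String) : List String :=
  match PySem.List.index? stepsList after_step with
  | none => []  -- Python raises ValueError here; excluded by Pre_
  | some i =>
    let rest := PySem.List.slice stepsList (some ((i : Int) + 1)) none
    if rest.contains before_step then
      PySem.List.slice rest none (some ((rest.idxOf before_step : Int)))
    else rest

-- ===== PRECONDITION & SPEC =====
-- Pre_ excludes exactly the inputs where A raises ValueError (after_step not a known step).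
def Pre_steps_between (after_step : String) (before_step : String) : Prop :=
  after_step ∈ stepsList
instance (after_step : String) (before_step : String) : Decidable (Pre_steps_between after_step before_step) := by unfold Pre_steps_between; infer_instance

def pvWitness_steps_between : String × String := ("extinction", "units")

def Spec_steps_between (after_step : String) (before_step : String) (out : List String) : Prop := out = steps_between_alt after_step before_step
instance (after_step : String) (before_step : String) (out : List String) : Decidable (Spec_steps_between after_step before_step out) := by unfold Spec_steps_between; infer_instance

-- ===== CLAIM (what is proved, stated in full; the proofs are below) =====
def Claim_equal_steps_between : Prop := ∀ (after_step : String) (before_step : String), Dom_steps_between after_step before_step → Pre_steps_between after_step before_step → Spec_steps_between after_step before_step (steps_between after_step before_step)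

-- ===== LEMMAS AND PROOFS =====

-- ===== VERDICT (by name: the statement is the Claim_ definition above) =====
set_option maxHeartbeats 2000000 in
theorem steps_between_spec : Claim_equal_steps_between := by
  intro a b _ hpre
  unfold Pre_steps_between stepsList at hpre
  simp only [List.mem_cons, List.not_mem_nil, or_false] at hpre
  show steps_between a b = steps_between_alt a b
  rcases hpre with h | h | h | h | h
  all_goals subst h
  all_goals (
    by_cases h1 : b = "extinction" <;>
    by_cases h2 : b = "subtraction" <;>
    by_cases h3 : b = "errormaps" <;>
    by_cases h4 : b = "units" <;>
    first
      | (subst h1; decide)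
      | (subst h2; decide)
      | (subst h3; decide)
      | (subst h4; decide)
      | simp [steps_between, steps_between_alt, stepsLoopA, stepsList,
          PySem.List.index?, List.idxOf?, List.findIdx?, List.findIdx?.go,
          PySem.List.slice, PySem.List.clampIdx,
          Ne.symm h1, Ne.symm h2, Ne.symm h3, Ne.symm h4])
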